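-- pv_equiv track=rewrite | github.com/paleumm/ood | chapter6/perket.py | solve
-- ===== SOURCE A (Python) =====
-- def solve(arr: list):
--     ls = combi(arr)
--     min = 1000000000
--     for e in ls:
--         if len(e) == 0:
--             continue
--
--         proS = 1
--         sumB = 0
--         for ee in e:
--             proS *= ee[0]
--             sumB += ee[1]
--
--         sb = abs(proS - sumB)
--
--         if sb < min:
--             min = sb
--
--     return min
--
-- def combi(arr: list) -> list:
--     if len(arr) == 0:
--         return [[]]
--
--     first = arr[0]
--     restofArr = arr[1:]
--     combsA = combi(restofArr)
--     combsB = []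
--
--     for comb in combsA:
--         c = [first] + comb
--         combsB.append(c)
--
--     return combsA + combsB
-- ===== SOURCE B (Python) =====
-- def solve(arr: list):
--     def dfs(rest, prod, sm, used):
--         if not rest:
--             return abs(prod - sm) if used else 1000000000
--         p, q = rest[0]
--         return min(dfs(rest[1:], prod * p, sm + q, True), dfs(rest[1:], prod, sm, used))
--     return dfs(arr, 1, 0, False)
-- ===== Notes on version B (the rewrite author's own statement) =====
-- stated objective: simpler
-- what changed: Replaced the materialized power-set (combi builds all 2^n subset lists, then a second pass recomputes product and sum of each) by a recursive include/exclude DFS that carries the running product, running sum and a used flag, so no subset lists are ever built.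
import Mathlib
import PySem

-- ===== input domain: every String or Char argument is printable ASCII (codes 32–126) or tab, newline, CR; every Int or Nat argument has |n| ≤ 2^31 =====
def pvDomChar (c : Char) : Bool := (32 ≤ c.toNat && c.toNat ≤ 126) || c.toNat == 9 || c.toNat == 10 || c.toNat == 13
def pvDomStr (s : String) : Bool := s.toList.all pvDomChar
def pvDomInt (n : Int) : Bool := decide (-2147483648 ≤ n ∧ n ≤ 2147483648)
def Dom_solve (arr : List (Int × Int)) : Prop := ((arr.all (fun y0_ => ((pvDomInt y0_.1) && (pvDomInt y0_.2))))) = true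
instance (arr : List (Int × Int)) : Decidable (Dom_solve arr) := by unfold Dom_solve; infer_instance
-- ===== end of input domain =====

-- B replaces A's materialized power set + per-subset recomputation by an include/exclude DFS carrying running product/sum accumulators (objective: simpler).

-- ===== PORT A =====
-- 'for comb in combsA: combsB.append([first] + comb)'
def combiLoop (first : Int × Int) : List (List (Int × Int)) → List (List (Int × Int)) → List (List (Int × Int))
  | [], combsB => combsB
  | comb :: rest, combsB => combiLoop first rest (combsB ++ [first :: comb])

def combi : List (Int × Int) → List (List (Int × Int))
  | [] => [[]]
  | first :: restofArr =>
    let combsA := combi restofArr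
    let combsB := combiLoop first combsA []
    combsA ++ combsB

-- 'for ee in e: proS *= ee[0]; sumB += ee[1]'
def innerLoop : List (Int × Int) → Int × Int → Int × Int
  | [], st => st
  | ee :: rest, st => innerLoop rest (st.1 * ee.1, st.2 + ee.2)

-- 'for e in ls: …' with accumulator m (A's variable 'min')
def outerLoop : List (List (Int × Int)) → Int → Int
  | [], m => m
  | e :: rest, m =>
    if e.length = 0 then outerLoop rest m
    else
      let ps := innerLoop e (1, 0)
      let sb := |ps.1 - ps.2|
      outerLoop rest (if sb < m then sb else m)

def solve (arr : List (Int × Int)) : Int :=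
  let ls := combi arr
  outerLoop ls 1000000000

-- ===== PORT B =====
def dfsB : List (Int × Int) → Int → Int → Bool → Int
  | [], prod, sm, used => if used then |prod - sm| else 1000000000
  | (p, q) :: rest, prod, sm, used =>
      min (dfsB rest (prod * p) (sm + q) true) (dfsB rest prod sm used)

def solve_alt (arr : List (Int × Int)) : Int := dfsB arr 1 0 false

-- ===== PRECONDITION & SPEC =====
def Spec_solve (arr : List (Int × Int)) (out : Int) : Prop := out = solve_alt arr
instance (arr : List (Int × Int)) (out : Int) : Decidable (Spec_solve arr out) := by unfold Spec_solve; infer_instance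

-- ===== CLAIM (what is proved, stated in full; the proofs are below) =====
def Claim_equal_solve : Prop := ∀ (arr : List (Int × Int)), Dom_solve arr → Spec_solve arr (solve arr)

-- ===== LEMMAS AND PROOFS =====

-- value contributed by one subset e, relative to accumulators (prod, sm) and the used flag
def fval (used : Bool) (prod sm : Int) (e : List (Int × Int)) : Int :=
  if used = true ∨ e ≠ [] then |prod * (e.map Prod.fst).prod - (sm + (e.map Prod.snd).sum)| else 1000000000

-- min of a nonempty list (1000000000 on [], never used there)
def mne : List Int → Int
  | [] => 1000000000
  | [x] => x
  | x :: y :: xs => min x (mne (y :: xs))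

theorem mne_cons {x : Int} {l : List Int} (h : l ≠ []) : mne (x :: l) = min x (mne l) := by
  cases l with
  | nil => exact absurd rfl h
  | cons y ys => rfl

theorem mne_append {l1 l2 : List Int} (h1 : l1 ≠ []) (h2 : l2 ≠ []) :
    mne (l1 ++ l2) = min (mne l1) (mne l2) := by
  induction l1 with
  | nil => exact absurd rfl h1
  | cons x xs ih =>
    cases xs with
    | nil =>
      simp only [List.cons_append, List.nil_append]
      rw [mne_cons h2]; rfl
    | cons y ys =>
      have hne : (y :: ys : List Int) ≠ [] := by simp
      have hne2 : ((y :: ys) ++ l2 : List Int) ≠ [] := by simp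
      simp only [List.cons_append] at *
      rw [mne_cons hne2, ih hne, mne_cons hne, min_assoc]

theorem mne_le_mem {x : Int} {l : List Int} (h : x ∈ l) : mne l ≤ x := by
  induction l with
  | nil => simp at h
  | cons a as ih =>
    cases as with
    | nil => simp at h; simp [mne, h]
    | cons b bs =>
      rw [mne_cons (by simp)]
      rcases List.mem_cons.mp h with rfl | h'
      · exact min_le_left _ _
      · exact le_trans (min_le_right _ _) (ih h')

theorem combi_ne (arr : List (Int × Int)) : combi arr ≠ [] := by
  induction arr with
  | nil => simp [combi]
  | cons a as ih =>
    simp only [combi, ne_eq, List.append_eq_nil_iff, not_and]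
    intro h
    exact absurd h ih

theorem nil_mem_combi (arr : List (Int × Int)) : [] ∈ combi arr := by
  induction arr with
  | nil => simp [combi]
  | cons a as ih => simp only [combi]; exact List.mem_append.mpr (Or.inl ih)

-- A's combsB loop is a map
theorem combiLoop_eq_map (first : Int × Int) (l : List (List (Int × Int))) :
    ∀ acc, combiLoop first l acc = acc ++ l.map (first :: ·) := by
  induction l with
  | nil => intro acc; simp [combiLoop]
  | cons c cs ih => intro acc; simp [combiLoop, ih]

theorem fval_cons (used : Bool) (prod sm p q : Int) (e : List (Int × Int)) :
    fval used prod sm ((p, q) :: e) = fval true (prod * p) (sm + q) e := by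
  have h1 : (true = true ∨ e ≠ []) := Or.inl rfl
  have h2 : (used = true ∨ ((p, q) :: e : List (Int × Int)) ≠ []) := Or.inr (by simp)
  unfold fval
  rw [if_pos h2, if_pos h1]
  simp only [List.map_cons, List.prod_cons, List.sum_cons]
  ring_nf

-- key lemma about B: dfsB computes the min of fval over all subsets (as listed by combi)
theorem dfsB_eq_mne (arr : List (Int × Int)) :
    ∀ (prod sm : Int) (used : Bool),
      dfsB arr prod sm used = mne ((combi arr).map (fval used prod sm)) := by
  induction arr with
  | nil =>
    intro prod sm used
    simp only [combi, List.map_cons, List.map_nil, dfsB, mne, fval]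
    cases used <;> simp
  | cons pq rest ih =>
    intro prod sm used
    obtain ⟨p, q⟩ := pq
    have hA := combi_ne rest
    have hmapA : (combi rest).map (fval used prod sm) ≠ [] := by simpa using hA
    have hmapB : ((combi rest).map ((p, q) :: ·)).map (fval used prod sm) ≠ [] := by
      simpa using hA
    simp only [combi, dfsB]
    rw [combiLoop_eq_map, List.nil_append, List.map_append, mne_append hmapA hmapB,
      List.map_map]
    have hcomp : (fval used prod sm ∘ ((p, q) :: ·)) = fval true (prod * p) (sm + q) := by
      funext e; exact fval_cons used prod sm p q e
    rw [hcomp, ih, ih, min_comm]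

theorem innerLoop_eq (e : List (Int × Int)) :
    ∀ a b : Int, innerLoop e (a, b) = (a * (e.map Prod.fst).prod, b + (e.map Prod.snd).sum) := by
  induction e with
  | nil => intro a b; simp [innerLoop]
  | cons x xs ih =>
    intro a b
    simp only [innerLoop, List.map_cons, List.prod_cons, List.sum_cons, ih]
    ring_nf

-- key lemma about A: the outer loop is a chain of min-updates with fval false 1 0
theorem outerLoop_eq (ls : List (List (Int × Int))) :
    ∀ m : Int, m ≤ 1000000000 →
      outerLoop ls m = ls.foldl (fun m e => min m (fval false 1 0 e)) m := by
  induction ls with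
  | nil => intro m _; rfl
  | cons e es ih =>
    intro m hm
    by_cases he : e = []
    · subst he
      have h0 : fval false 1 0 ([] : List (Int × Int)) = 1000000000 := by simp [fval]
      simp only [outerLoop, List.foldl_cons, h0, min_eq_left hm]
      exact ih m hm
    · have hlen : ¬ e.length = 0 := by simpa [List.length_eq_zero_iff] using he
      simp only [outerLoop, if_neg hlen, innerLoop_eq, List.foldl_cons]
      have hf : fval false 1 0 e = |1 * (e.map Prod.fst).prod - (0 + (e.map Prod.snd).sum)| := by
        simp [fval, he]
      have hmin : (if |1 * (e.map Prod.fst).prod - (0 + (e.map Prod.snd).sum)| < m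
            then |1 * (e.map Prod.fst).prod - (0 + (e.map Prod.snd).sum)| else m)
          = min m (fval false 1 0 e) := by
        rw [hf, min_def]
        split_ifs <;> omega
      rw [hmin]
      exact ih _ (le_trans (min_le_left _ _) hm)

-- folding min-updates equals min of the start value and the minimum of the list
theorem foldl_min_mne (F : List (Int × Int) → Int) :
    ∀ (ls : List (List (Int × Int))), ls ≠ [] → ∀ init : Int,
      ls.foldl (fun m e => min m (F e)) init = min init (mne (ls.map F)) := by
  intro ls
  induction ls with
  | nil => intro h; exact absurd rfl h
  | cons x xs ih =>
    intro _ init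
    cases xs with
    | nil => simp [mne]
    | cons y ys =>
      have hne : (y :: ys : List (List (Int × Int))) ≠ [] := by simp
      rw [List.foldl_cons, ih hne]
      conv_rhs => rw [List.map_cons, List.map_cons, mne_cons (by simp)]
      rw [List.map_cons, min_assoc]

-- ===== VERDICT (by name: the statement is the Claim_ definition above) =====
theorem solve_spec : Claim_equal_solve := by
  intro arr _
  unfold Spec_solve
  show solve arr = solve_alt arr
  show outerLoop (combi arr) 1000000000 = dfsB arr 1 0 false
  rw [dfsB_eq_mne, outerLoop_eq _ _ le_rfl, foldl_min_mne _ _ (combi_ne arr)]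
  have hmem : (1000000000 : Int) ∈ (combi arr).map (fval false 1 0) := by
    have h0 : fval false 1 0 ([] : List (Int × Int)) = 1000000000 := by simp [fval]
    exact h0 ▸ List.mem_map_of_mem (nil_mem_combi arr)
  exact min_eq_right (mne_le_mem hmem)
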